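-- pv_equiv track=rewrite | github.com/pypi-data/pypi-mirror-53 | packages/learnusumjap/learnusumjap-1.0.0.tar.gz/learnusumjap-1.0.0/learnusumjap/explain_reading.py | count_True_after
-- ===== SOURCE A (Python) =====
-- def count_True_after(lst):
--     r = []
--     n = len(lst)
--     j = n
--     for i in reversed(range(n)):
--         r.insert(0, j-i-1)
--         if not lst[i]:
--             j = i
--     r.insert(0, j)
--     return tuple(r)
-- ===== SOURCE B (Python) =====
-- def count_True_after(lst):
--     result = []
--     run = 0
--     for x in lst:
--         if x:
--             run += 1
--         else:
--             result.extend(range(run, 0, -1))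
--             result.append(0)
--             run = 0
--     result.extend(range(run, -1, -1))
--     return tuple(result)
-- ===== Notes on version B (the rewrite author's own statement) =====
-- stated objective: faster
-- what changed: A walks the list right-to-left tracking the index of the next False and prepending one count per position with insert(0, ...); B makes a single forward pass with a run counter and emits each True-run's countdown in a batch at every False and at the end.
import Mathlib
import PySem

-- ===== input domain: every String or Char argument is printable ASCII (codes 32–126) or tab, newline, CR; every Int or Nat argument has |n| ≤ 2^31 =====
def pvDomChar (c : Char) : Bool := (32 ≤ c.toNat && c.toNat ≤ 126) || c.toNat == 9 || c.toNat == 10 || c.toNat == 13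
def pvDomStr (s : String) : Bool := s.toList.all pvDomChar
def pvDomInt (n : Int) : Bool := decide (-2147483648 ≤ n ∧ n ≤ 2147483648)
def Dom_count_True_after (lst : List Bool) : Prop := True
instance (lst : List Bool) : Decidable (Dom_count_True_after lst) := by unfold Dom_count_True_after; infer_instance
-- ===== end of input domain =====

-- B replaces A's right-to-left next-False index tracking by a single forward pass with a
-- run counter that emits each True-run's countdown in a batch (objective: alternative decomposition).

-- ===== PORT A =====
-- the loop body of A: r.insert(0, j-i-1); if not lst[i]: j = i   (state = (r, j))
-- pyGetD is exact here: every i drawn from reversed(range(n)) satisfies 0 ≤ i < len lst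
def stepA (lst : List Bool) (st : List Int × Int) (i : Int) : List Int × Int :=
  if !(PySem.List.pyGetD lst i false) then ((st.2 - i - 1) :: st.1, i)
  else ((st.2 - i - 1) :: st.1, st.2)

def count_True_after (lst : List Bool) : List Int :=
  let n : Int := lst.length
  let st := ((PySem.List.pyRange 0 n 1).reverse).foldl (stepA lst) ([], n)
  st.2 :: st.1

-- ===== PORT B =====
-- forward pass keeping the current consecutive-True run length; on a False emit the
-- countdown range(run, 0, -1) and the 0; at the end emit range(run, -1, -1)
def altGo (t : List Bool) (run : Int) : List Int :=
  match t with
  | [] => PySem.List.pyRange run (-1) (-1)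
  | x :: rest =>
    if x then altGo rest (run + 1)
    else PySem.List.pyRange run 0 (-1) ++ 0 :: altGo rest 0

def count_True_after_alt (lst : List Bool) : List Int := altGo lst 0

-- ===== PRECONDITION & SPEC =====
def Spec_count_True_after (lst : List Bool) (out : List Int) : Prop := out = count_True_after_alt lst
instance (lst : List Bool) (out : List Int) : Decidable (Spec_count_True_after lst out) := by unfold Spec_count_True_after; infer_instance

-- ===== CLAIM (what is proved, stated in full; the proofs are below) =====
def Claim_equal_count_True_after : Prop := ∀ (lst : List Bool), Dom_count_True_after lst → Spec_count_True_after lst (count_True_after lst)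

-- ===== LEMMAS AND PROOFS =====

-- common characterisation: specG lst c = the output list, where c is the value to report
-- at the virtual position past the end (0 for the whole list)
def specG : List Bool → Int → List Int
  | [], c => [c]
  | b :: t, c => (if b then (specG t c).headI + 1 else 0) :: specG t c

theorem specG_ne_nil (t : List Bool) (c : Int) : specG t c ≠ [] := by
  cases t <;> simp [specG]

theorem headI_append_of_ne_nil (l l' : List Int) (h : l ≠ []) : (l ++ l').headI = l.headI := by
  cases l with
  | nil => exact absurd rfl h
  | cons a t => simp

theorem tail_append_of_ne_nil (l l' : List Int) (h : l ≠ []) : (l ++ l').tail = l.tail ++ l' := by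
  cases l with
  | nil => exact absurd rfl h
  | cons a t => simp

theorem cons_headI_tail (l : List Int) (h : l ≠ []) : l.headI :: l.tail = l := by
  cases l with
  | nil => exact absurd rfl h
  | cons a t => simp

theorem specG_append (t : List Bool) (b : Bool) (c : Int) :
    specG (t ++ [b]) c = specG t (if b then c + 1 else 0) ++ [c] := by
  induction t with
  | nil => cases b <;> simp [specG]
  | cons x t ih =>
    simp only [List.cons_append, specG, ih,
      headI_append_of_ne_nil _ _ (specG_ne_nil t _)]

-- desc h m = [h+m, h+m-1, …, h+1]
def desc (h : Int) : Nat → List Int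
  | 0 => []
  | m + 1 => (h + (m + 1)) :: desc h m

theorem desc_range (m : Nat) : PySem.List.pyRange (m : Int) 0 (-1) = desc 0 m := by
  induction m with
  | zero => simp [PySem.List.pyRange_neg_one_eq_nil le_rfl, desc]
  | succ m ih =>
    rw [show ((m + 1 : Nat) : Int) = (m : Int) + 1 by push_cast; ring,
      PySem.List.pyRange_neg_one_cons (by positivity)]
    simp [desc, ih]

theorem desc_range_full (m : Nat) : PySem.List.pyRange (m : Int) (-1) (-1) = desc 0 m ++ [0] := by
  induction m with
  | zero =>
    rw [show ((0 : Nat) : Int) = 0 by norm_num, PySem.List.pyRange_neg_one_cons (by norm_num)]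
    simp [PySem.List.pyRange_neg_one_eq_nil le_rfl, desc]
  | succ m ih =>
    rw [show ((m + 1 : Nat) : Int) = (m : Int) + 1 by push_cast; ring,
      PySem.List.pyRange_neg_one_cons (by omega)]
    simp [desc, ih]

theorem desc_shift (m : Nat) (h : Int) : desc (h + 1) m ++ [h + 1] = desc h (m + 1) := by
  induction m with
  | zero => simp [desc]
  | succ m ih =>
    show ((h + 1) + (m + 1)) :: (desc (h + 1) m ++ [h + 1]) = desc h (m + 2)
    rw [ih]
    show _ = (h + ((m + 1) + 1)) :: desc h (m + 1)
    congr 1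
    ring

theorem altGo_eq (t : List Bool) (m : Nat) :
    altGo t (m : Int) = desc ((specG t 0).headI) m ++ specG t 0 := by
  induction t generalizing m with
  | nil => simp [altGo, specG, desc_range_full]
  | cons x t ih =>
    cases x with
    | true =>
      show altGo t ((m : Int) + 1) = _
      rw [show ((m : Int) + 1) = ((m + 1 : Nat) : Int) by push_cast; ring, ih (m + 1)]
      simp only [specG, if_true]
      rw [← desc_shift m ((specG t 0).headI), List.append_assoc]
      simp
    | false =>
      show PySem.List.pyRange (m : Int) 0 (-1) ++ 0 :: altGo t 0 = _
      have h0 := ih 0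
      rw [Nat.cast_zero] at h0
      rw [h0, desc_range]
      simp [specG, desc]

theorem alt_eq_specG (lst : List Bool) : count_True_after_alt lst = specG lst 0 := by
  have h0 := altGo_eq lst 0
  rw [Nat.cast_zero] at h0
  unfold count_True_after_alt
  rw [h0]
  simp [desc]

theorem foldA (lst : List Bool) (r0 : List Int) (j0 : Int) :
    ((PySem.List.pyRange 0 (lst.length : Int) 1).reverse).foldl (stepA lst) (r0, j0)
      = ((specG lst (j0 - lst.length)).tail ++ r0, (specG lst (j0 - lst.length)).headI) := by
  induction lst using List.reverseRecOn generalizing r0 j0 with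
  | nil => simp [PySem.List.pyRange_one_eq_nil le_rfl, specG]
  | append_singleton t b ih =>
    have hlen : ((t ++ [b]).length : Int) = (t.length : Int) + 1 := by
      simp
    rw [hlen, PySem.List.pyRange_one_succ_right (by omega), List.reverse_append]
    simp only [List.reverse_cons, List.reverse_nil, List.nil_append, List.singleton_append,
      List.foldl_cons]
    have hget : PySem.List.pyGetD (t ++ [b]) (t.length : Int) false = b := by
      rw [PySem.List.pyGetD_eq_getElem _ _ (by omega) (by simp)]
      simp
    have hcongr : ((PySem.List.pyRange 0 (t.length : Int) 1).reverse).foldl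
        (stepA (t ++ [b])) (stepA (t ++ [b]) (r0, j0) (t.length : Int))
        = ((PySem.List.pyRange 0 (t.length : Int) 1).reverse).foldl
        (stepA t) (stepA (t ++ [b]) (r0, j0) (t.length : Int)) := by
      apply PySem.List.foldl_congr_mem
      intro acc i hi
      rw [List.mem_reverse, PySem.List.mem_pyRange_one] at hi
      have hg : PySem.List.pyGetD (t ++ [b]) i false = PySem.List.pyGetD t i false := by
        rw [PySem.List.pyGetD_eq_getElem _ _ hi.1 (by simp; omega),
          PySem.List.pyGetD_eq_getElem _ _ hi.1 (by omega)]
        rw [List.getElem_append_left (by omega)]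
      simp [stepA, hg]
    rw [hcongr]
    have hspec := specG_append t b (j0 - ((t.length : Int) + 1))
    cases b with
    | true =>
      have hstep : stepA (t ++ [true]) (r0, j0) (t.length : Int)
          = ((j0 - (t.length : Int) - 1) :: r0, j0) := by
        simp [stepA, hget]
      rw [hstep, ih]
      simp only [if_true] at hspec
      rw [show j0 - (t.length : Int) = j0 - ((t.length : Int) + 1) + 1 by ring] at *
      rw [hspec,
        tail_append_of_ne_nil _ _ (specG_ne_nil _ _),
        headI_append_of_ne_nil _ _ (specG_ne_nil _ _)]
      simp
    | false =>
      have hstep : stepA (t ++ [false]) (r0, j0) (t.length : Int)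
          = ((j0 - (t.length : Int) - 1) :: r0, (t.length : Int)) := by
        simp [stepA, hget]
      rw [hstep, ih]
      simp only [Bool.false_eq_true, if_false] at hspec
      rw [hspec,
        tail_append_of_ne_nil _ _ (specG_ne_nil _ _),
        headI_append_of_ne_nil _ _ (specG_ne_nil _ _)]
      have h1 : j0 - (t.length : Int) - 1 = j0 - ((t.length : Int) + 1) := by ring
      simp [h1]

theorem a_eq_specG (lst : List Bool) : count_True_after lst = specG lst 0 := by
  show (((PySem.List.pyRange 0 (lst.length : Int) 1).reverse).foldl (stepA lst)
      ([], (lst.length : Int))).2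
    :: (((PySem.List.pyRange 0 (lst.length : Int) 1).reverse).foldl (stepA lst)
      ([], (lst.length : Int))).1 = specG lst 0
  rw [foldA lst [] (lst.length : Int)]
  simp only [sub_self, List.append_nil]
  exact cons_headI_tail _ (specG_ne_nil _ _)

-- ===== VERDICT (by name: the statement is the Claim_ definition above) =====
theorem count_True_after_spec : Claim_equal_count_True_after := by
  intro lst _
  unfold Spec_count_True_after
  rw [a_eq_specG, alt_eq_specG]
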